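-- pv_equiv track=rewrite | github.com/situNagisa/vulkan_killer | vk/ccpp.py | is_stdint_type
-- ===== SOURCE A (Python) =====
-- def is_stdint_type(t: str) -> bool:
--     if t == 'size_t':
--         return True
--     if not t.endswith('_t'):
--         return False
--     for prefix in ('int8', 'int16', 'int32', 'int64', 'int'):
--         if t.startswith(f'{prefix}_') or t.startswith(f'u{prefix}_'):
--             return True
--     return False
-- ===== SOURCE B (Python) =====
-- def is_stdint_type(t: str) -> bool:
--     # single left-to-right parse: optional unsigned letter, stem, optional width, underscore; plus the size_t special case
--     if t == 'size_t':
--         return True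
--     if not t.endswith('_t'):
--         return False
--     s = t[1:] if t.startswith('u') else t
--     if not s.startswith('int'):
--         return False
--     rest = s[3:]
--     return rest.startswith(('_', '8_', '16_', '32_', '64_'))
-- ===== Notes on version B (the rewrite author's own statement) =====
-- stated objective: idiomatic
-- what changed: Replaced the loop that tests each of the five stdint stems, both bare and with the unsigned letter prepended, against the whole string by a single left-to-right parse: strip an optional unsigned letter, require the stem, then check the remainder for an allowed width followed by an underscore.
import Mathlib
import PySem

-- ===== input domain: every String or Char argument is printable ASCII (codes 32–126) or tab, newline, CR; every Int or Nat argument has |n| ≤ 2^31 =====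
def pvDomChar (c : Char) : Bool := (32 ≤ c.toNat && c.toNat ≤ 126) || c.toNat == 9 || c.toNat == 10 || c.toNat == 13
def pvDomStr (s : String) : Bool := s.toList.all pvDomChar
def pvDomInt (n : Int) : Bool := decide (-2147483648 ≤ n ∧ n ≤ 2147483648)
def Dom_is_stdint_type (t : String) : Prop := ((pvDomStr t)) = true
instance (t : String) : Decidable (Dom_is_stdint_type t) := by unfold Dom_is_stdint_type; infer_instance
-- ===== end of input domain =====

-- B replaces A's ten whole-string prefix tests by one left-to-right parse (optional unsigned letter, stem, width, underscore); same cost, plainer shape.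

-- ===== PORT A =====
-- the tuple ('int8','int16','int32','int64','int') of A's loop
def pvPrefixesA : List (List Char) :=
  ["int8".toList, "int16".toList, "int32".toList, "int64".toList, "int".toList]

-- the for-loop with early return
def pvLoopA (cs : List Char) : List (List Char) → Bool
  | [] => false
  | p :: ps =>
    if PySem.Chars.startswith cs (p ++ ['_']) || PySem.Chars.startswith cs ('u' :: (p ++ ['_'])) then true
    else pvLoopA cs ps

def is_stdint_type (t : String) : Bool :=
  if t == "size_t" then true
  else if !(PySem.Str.endswith t "_t") then false
  else pvLoopA t.toList pvPrefixesA

-- ===== PORT B =====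
-- rest.startswith(('_', '8_', '16_', '32_', '64_'))
def pvAltSize (rest : List Char) : Bool :=
  PySem.Chars.startswith rest ['_'] || PySem.Chars.startswith rest ['8','_'] ||
  PySem.Chars.startswith rest ['1','6','_'] || PySem.Chars.startswith rest ['3','2','_'] ||
  PySem.Chars.startswith rest ['6','4','_']

-- "if not s.startswith('int'): return False; rest = s[3:]; return …"
def pvAltTail (s : List Char) : Bool :=
  if !(PySem.Chars.startswith s ['i','n','t']) then false
  else pvAltSize (PySem.Chars.slice s (some 3) none)

def is_stdint_type_alt (t : String) : Bool :=
  if t == "size_t" then true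
  else if !(PySem.Str.endswith t "_t") then false
  else pvAltTail (if PySem.Chars.startswith t.toList ['u']
                  then PySem.Chars.slice t.toList (some 1) none else t.toList)

-- ===== PRECONDITION & SPEC =====
def Spec_is_stdint_type (t : String) (out : Bool) : Prop := out = is_stdint_type_alt t
instance (t : String) (out : Bool) : Decidable (Spec_is_stdint_type t out) := by unfold Spec_is_stdint_type; infer_instance

-- ===== CLAIM (what is proved, stated in full; the proofs are below) =====
def Claim_equal_is_stdint_type : Prop := ∀ (t : String), Dom_is_stdint_type t → Spec_is_stdint_type t (is_stdint_type t)

-- ===== LEMMAS AND PROOFS =====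

theorem pv_isPrefixOf_append (p q cs : List Char) :
    (p ++ q).isPrefixOf cs = (p.isPrefixOf cs && q.isPrefixOf (cs.drop p.length)) := by
  induction p generalizing cs with
  | nil => simp
  | cons a p ih =>
    cases cs with
    | nil => simp [List.isPrefixOf]
    | cons c cs => simp [List.isPrefixOf, ih, Bool.and_assoc]

theorem pv_isPrefixOf_decide (l l' : List Char) : l.isPrefixOf l' = decide (l <+: l') := by
  by_cases h : l <+: l'
  · simp [h, List.isPrefixOf_iff_prefix]
  · simp [h, Bool.eq_false_iff, ne_eq, List.isPrefixOf_iff_prefix]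

-- shared core: A's five no-'u' prefix tests equal B's tail parse
theorem pv_core (cs : List Char) :
    (List.isPrefixOf ['i','n','t','8','_'] cs || List.isPrefixOf ['i','n','t','1','6','_'] cs ||
     List.isPrefixOf ['i','n','t','3','2','_'] cs || List.isPrefixOf ['i','n','t','6','4','_'] cs ||
     List.isPrefixOf ['i','n','t','_'] cs) = pvAltTail cs := by
  have h8 : (['i','n','t','8','_'] : List Char) = ['i','n','t'] ++ ['8','_'] := rfl
  have h16 : (['i','n','t','1','6','_'] : List Char) = ['i','n','t'] ++ ['1','6','_'] := rfl
  have h32 : (['i','n','t','3','2','_'] : List Char) = ['i','n','t'] ++ ['3','2','_'] := rfl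
  have h64 : (['i','n','t','6','4','_'] : List Char) = ['i','n','t'] ++ ['6','4','_'] := rfl
  have hu : (['i','n','t','_'] : List Char) = ['i','n','t'] ++ ['_'] := rfl
  rw [h8, h16, h32, h64, hu, pv_isPrefixOf_append, pv_isPrefixOf_append, pv_isPrefixOf_append,
    pv_isPrefixOf_append, pv_isPrefixOf_append]
  unfold pvAltTail pvAltSize
  rw [show PySem.Chars.slice cs (some 3) none = cs.drop 3 from by
    simp [PySem.Chars.slice_eq_listSlice, PySem.List.slice_from cs (a := 3) (by omega)]]
  cases h : List.isPrefixOf ['i','n','t'] cs with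
  | false => simp [PySem.Chars.startswith, h]
  | true =>
    simp only [PySem.Chars.startswith, h, Bool.true_and, Bool.not_true, Bool.false_eq_true,
      if_false, List.length]
    cases List.isPrefixOf ['_'] (cs.drop 3) <;> simp

theorem pv_tail_eq (cs : List Char) :
    pvLoopA cs pvPrefixesA =
    pvAltTail (if PySem.Chars.startswith cs ['u'] then PySem.Chars.slice cs (some 1) none else cs) := by
  cases cs with
  | nil => decide
  | cons c cs =>
    by_cases hc : c = 'u'
    · subst hc
      have hsw : PySem.Chars.startswith ('u' :: cs) ['u'] = true := by
        simp [PySem.Chars.startswith, List.isPrefixOf]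
      have hsl : PySem.Chars.slice ('u' :: cs) (some 1) none = cs := by
        simp [PySem.Chars.slice_eq_listSlice, PySem.List.slice_from ('u'::cs) (a := 1) (by omega)]
      rw [hsw, if_pos rfl, hsl]
      rw [← pv_core cs]
      simp [pvLoopA, pvPrefixesA, PySem.Chars.startswith, List.isPrefixOf,
        pv_isPrefixOf_decide, Bool.or_assoc]
    · have hsw : PySem.Chars.startswith (c :: cs) ['u'] = false := by
        simp [PySem.Chars.startswith, List.isPrefixOf]
        exact fun h => hc h.symm
      rw [hsw, if_neg (by simp)]
      rw [← pv_core (c :: cs)]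
      simp [pvLoopA, pvPrefixesA, PySem.Chars.startswith, List.isPrefixOf,
        pv_isPrefixOf_decide, Bool.or_assoc, Bool.beq_eq_decide_eq,
        show ¬ ('u' = c) from fun h => hc h.symm]

-- ===== VERDICT (by name: the statement is the Claim_ definition above) =====
theorem is_stdint_type_spec : Claim_equal_is_stdint_type := by
  intro t _
  unfold Spec_is_stdint_type is_stdint_type is_stdint_type_alt
  rw [pv_tail_eq]
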